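-- pv_equiv track=rewrite | github.com/sakshamgautam2001/anonymous_repository_for_conference | utils.py | make_guardrails_list
-- ===== SOURCE A (Python) =====
-- def eliminate_empty_lines(input_string):
--     lines = input_string.split('\n')
--     res_lines = []
--     for line in lines:
--         if len(line.split()) > 0:
--             res_lines.append(line)
--     return "\n".join(res_lines)
--
-- def make_guardrails_list(text):
--     if len(text.split()) == 0:
--         return []
--     text = eliminate_empty_lines(text)
--     lines = text.split('\n')
--     guardrails_arr = []
--     num_arr = [str(i) for i in range(1, 10)]
--     current_line = ""
--     for line in lines:
--         num = line.split()[0][0]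
--         if num in num_arr:
--             if len(current_line.split()) > 0:
--                 guardrails_arr.append(current_line)
--             current_line = " ".join(line.split()[1:])
--         else:
--             if len(current_line) > 0:
--                 current_line += "\n" + line
--
--     if len(current_line) > 0:
--         guardrails_arr.append(current_line)
--     return guardrails_arr
-- ===== SOURCE B (Python) =====
-- def make_guardrails_list(text):
--     # Pass 1: keep only lines that have at least one token.
--     lines = [ln for ln in text.split('\n') if ln.split()]
--     # Pass 2: partition into groups: a line whose first token starts with a
--     # digit 1-9 opens a group; any other line joins the currently open group.
--     groups = []
--     for line in lines:
--         if line.split()[0][0] in '123456789':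
--             groups.append([line])
--         elif groups:
--             groups[-1].append(line)
--     # Pass 3: format each group; a group whose header line has no text after
--     # the number yields nothing (its continuation lines are discarded).
--     result = []
--     for g in groups:
--         entry = ' '.join(g[0].split()[1:])
--         if entry:
--             for line in g[1:]:
--                 entry += '\n' + line
--             result.append(entry)
--     return result
-- ===== Notes on version B (the rewrite author's own statement) =====
-- stated objective: alternative
-- what changed: Replaces A's single-pass accumulator (with its blank-line prefiltering helper and trailing flush) by a two-phase decomposition: first partition lines into groups keyed by 1-9-numbered header lines, then format each group independently, dropping groups whose header has no text after the number.
import Mathlib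
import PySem

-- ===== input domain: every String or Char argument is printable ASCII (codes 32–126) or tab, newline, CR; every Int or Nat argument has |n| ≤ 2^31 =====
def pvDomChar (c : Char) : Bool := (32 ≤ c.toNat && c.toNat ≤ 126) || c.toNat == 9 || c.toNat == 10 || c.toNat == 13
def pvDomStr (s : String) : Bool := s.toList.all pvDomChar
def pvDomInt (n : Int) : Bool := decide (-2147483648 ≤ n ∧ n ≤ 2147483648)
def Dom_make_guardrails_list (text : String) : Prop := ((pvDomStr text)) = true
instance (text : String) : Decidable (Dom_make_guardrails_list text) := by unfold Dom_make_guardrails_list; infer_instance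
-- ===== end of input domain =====

-- B replaces A's one-pass accumulator with a partition-into-groups pass followed by a
-- per-group formatting pass (objective: alternative decomposition, same cost).

-- shared trivial helper: Python string concatenation, kept kernel-transparent
def pvCat (a b : String) : String := String.ofList (a.toList ++ b.toList)

-- ===== PORT A =====
def eliminate_empty_lines (input_string : String) : String :=
  let lines := (PySem.Str.split? input_string "\n").getD []
  let res_lines := lines.foldl
    (fun acc line => if (PySem.Str.split₀ line).length > 0 then acc ++ [line] else acc) []
  PySem.Str.join "\n" res_lines

def make_guardrails_list (text : String) : List String :=
  if (PySem.Str.split₀ text).length = 0 then []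
  else
    let text2 := eliminate_empty_lines text
    let lines := (PySem.Str.split? text2 "\n").getD []
    let num_arr := (PySem.List.pyRange 1 10 1).map (fun i => PySem.Int.toStr i)
    let st := lines.foldl
      (fun (st : List String × String) line =>
        let arr := st.1
        let cur := st.2
        -- num = line.split()[0][0]; the none case is Python's IndexError, unreachable
        -- here because every kept line has a token
        match (PySem.List.pyGet? (PySem.Str.split₀ line) 0).bind
                (fun w => PySem.Str.pyGet? w 0) with
        | none => (arr, cur)
        | some c =>
          if String.ofList [c] ∈ num_arr then
            ((if (PySem.Str.split₀ cur).length > 0 then arr ++ [cur] else arr),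
             PySem.Str.join " " (PySem.List.slice (PySem.Str.split₀ line) (some 1) none))
          else
            (arr, if PySem.Str.len cur > 0 then pvCat cur (pvCat "\n" line) else cur))
      ([], "")
    if PySem.Str.len st.2 > 0 then st.1 ++ [st.2] else st.1

-- ===== PORT B =====
def make_guardrails_list_alt (text : String) : List String :=
  let lines := ((PySem.Str.split? text "\n").getD []).filter
    (fun line => !(PySem.Str.split₀ line).isEmpty)
  let groups := lines.foldl
    (fun (gs : List (List String)) line =>
      -- line.split()[0][0]; both inner [] / none cases are unreachable (kept
      -- lines have a token; split words are nonempty)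
      match PySem.Str.split₀ line with
      | [] => gs
      | w :: _ =>
        match PySem.Str.pyGet? w 0 with
        | none => gs
        | some c =>
          if PySem.Str.isIn (String.ofList [c]) "123456789" then gs ++ [[line]]
          else if gs.isEmpty then gs
          else gs.dropLast ++ [gs.getLastD [] ++ [line]]) []
  groups.filterMap (fun g =>
    let entry := PySem.Str.join " " ((PySem.Str.split₀ (g.headD "")).drop 1)
    if entry = "" then none
    else some ((g.drop 1).foldl (fun e line => pvCat e (pvCat "\n" line)) entry))

-- ===== PRECONDITION & SPEC =====
def Spec_make_guardrails_list (text : String) (out : List String) : Prop := out = make_guardrails_list_alt text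
instance (text : String) (out : List String) : Decidable (Spec_make_guardrails_list text out) := by unfold Spec_make_guardrails_list; infer_instance

-- ===== CLAIM (what is proved, stated in full; the proofs are below) =====
def Claim_equal_make_guardrails_list : Prop := ∀ (text : String), Dom_make_guardrails_list text → Spec_make_guardrails_list text (make_guardrails_list text)

-- ===== LEMMAS AND PROOFS =====
def pvMySplit : List Char → List (List Char)
  | [] => [[]]
  | c :: r => if c = '\n' then [] :: pvMySplit r else (pvMySplit r).modifyHead (fun p => c :: p)

theorem pvMySplit_cons (s : List Char) : ∃ h t, pvMySplit s = h :: t := by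
  induction s with
  | nil => exact ⟨[], [], rfl⟩
  | cons c r ih =>
    obtain ⟨h, t, hs⟩ := ih
    by_cases hc : c = '\n'
    · exact ⟨[], pvMySplit r, by simp [pvMySplit, hc]⟩
    · exact ⟨c :: h, t, by simp [pvMySplit, hc, hs]⟩

theorem pv_go_eq (fuel : Nat) (l cur : List Char) (acc2 : List (List Char))
    (h : l.length < fuel) :
    PySem.Chars.splitOn.go ['\n'] fuel l cur acc2
      = acc2.reverse ++ (pvMySplit l).modifyHead (fun p => cur.reverse ++ p) := by
  induction fuel generalizing l cur acc2 with
  | zero => omega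
  | succ f ih =>
    cases l with
    | nil => simp [PySem.Chars.splitOn.go, pvMySplit]
    | cons c r =>
      by_cases hc : c = '\n'
      · subst hc
        have hpre : List.isPrefixOf ['\n'] ('\n' :: r) = true := by simp [List.isPrefixOf]
        obtain ⟨h0, t0, hs⟩ := pvMySplit_cons r
        simp only [PySem.Chars.splitOn.go, hpre, if_true, List.length_cons, List.drop_succ_cons]
        simp only [List.length_nil, List.drop_zero]
        rw [ih r [] (cur.reverse :: acc2) (by simpa using Nat.lt_of_succ_lt_succ h)]
        simp [pvMySplit, hs]
      · have hpre : List.isPrefixOf ['\n'] (c :: r) = false := by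
          simp [List.isPrefixOf]; exact fun hcc => (hc hcc.symm).elim
        obtain ⟨h0, t0, hs⟩ := pvMySplit_cons r
        simp only [PySem.Chars.splitOn.go, hpre]
        rw [ih r (c :: cur) acc2 (by simpa using Nat.lt_of_succ_lt_succ h)]
        simp [pvMySplit, hc, hs]

theorem pv_splitOn_nl (s : List Char) :
    PySem.Chars.splitOn s ['\n'] = pvMySplit s := by
  obtain ⟨h0, t0, hs⟩ := pvMySplit_cons s
  unfold PySem.Chars.splitOn
  rw [pv_go_eq (s.length + 1) s [] [] (by omega)]
  simp [hs]

theorem pvMySplit_no_nl (s : List Char) : ∀ p ∈ pvMySplit s, '\n' ∉ p := by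
  induction s with
  | nil => simp [pvMySplit]
  | cons c r ih =>
    intro p hp
    by_cases hc : c = '\n'
    · simp only [pvMySplit, hc, if_true, List.mem_cons] at hp
      rcases hp with rfl | hp
      · simp
      · exact ih p hp
    · obtain ⟨h0, t0, hs⟩ := pvMySplit_cons r
      simp only [pvMySplit, if_neg hc, hs, List.modifyHead, List.mem_cons] at hp
      rcases hp with rfl | hp
      · intro hmem
        rcases List.mem_cons.mp hmem with hmem | hmem
        · exact hc hmem.symm
        · exact ih h0 (by simp [hs]) hmem
      · exact ih p (by simp [hs, hp])

theorem pv_intercalate_cons (sep x : List Char) (y : List Char) (t : List (List Char)) :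
    List.intercalate sep (x :: y :: t) = x ++ sep ++ List.intercalate sep (y :: t) := by
  simp [List.intercalate, List.intersperse]

theorem pv_join_mySplit (s : List Char) :
    PySem.Chars.join ['\n'] (pvMySplit s) = s := by
  induction s with
  | nil => simp [pvMySplit, PySem.Chars.join, List.intercalate]
  | cons c r ih =>
    obtain ⟨h0, t0, hs⟩ := pvMySplit_cons r
    rw [PySem.Chars.join] at ih ⊢
    by_cases hc : c = '\n'
    · simp only [pvMySplit, hc, if_true, hs] at *
      rw [pv_intercalate_cons]
      simp [ih]
    · simp only [pvMySplit, if_neg hc, hs, List.modifyHead] at *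
      cases t0 with
      | nil => simp_all [List.intercalate]
      | cons y t =>
        rw [pv_intercalate_cons] at ih
        rw [pv_intercalate_cons]
        simp_all

theorem pvMySplit_id_of_no_nl (x : List Char) (h : '\n' ∉ x) : pvMySplit x = [x] := by
  induction x with
  | nil => rfl
  | cons c r ih =>
    have hc : c ≠ '\n' := fun hc => h (by simp [hc])
    have : pvMySplit r = [r] := ih (fun hm => h (by simp [hm]))
    simp [pvMySplit, hc, this, List.modifyHead]

theorem pvMySplit_append_nl (x r : List Char) (h : '\n' ∉ x) :
    pvMySplit (x ++ '\n' :: r) = x :: pvMySplit r := by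
  induction x with
  | nil => simp [pvMySplit]
  | cons c y ih =>
    have hc : c ≠ '\n' := fun hc => h (by simp [hc])
    have := ih (fun hm => h (by simp [hm]))
    simp [pvMySplit, hc, this, List.modifyHead]

theorem pvMySplit_join (ps : List (List Char)) (h1 : ∀ p ∈ ps, '\n' ∉ p) (h2 : ps ≠ []) :
    pvMySplit (PySem.Chars.join ['\n'] ps) = ps := by
  induction ps with
  | nil => exact absurd rfl h2
  | cons x t ih =>
    cases t with
    | nil =>
      rw [PySem.Chars.join]
      have : ['\n'].intercalate [x] = x := by
        simp [List.intercalate]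
      rw [this]
      exact pvMySplit_id_of_no_nl x (h1 x (by simp))
    | cons y tt =>
      rw [PySem.Chars.join, pv_intercalate_cons]
      rw [List.append_assoc]
      have hx : '\n' ∉ x := h1 x (by simp)
      have hshape : (['\n'] ++ List.intercalate ['\n'] (y :: tt)) = '\n' :: List.intercalate ['\n'] (y :: tt) := by simp
      rw [hshape, pvMySplit_append_nl x _ hx]
      have := ih (fun p hp => h1 p (by simp [hp])) (by simp)
      rw [PySem.Chars.join] at this
      rw [this]

theorem pv_split₀_go_words (s : List Char) : ∀ (cur : List Char) (acc : List (List Char)),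
    (∀ w ∈ acc, w ≠ [] ∧ ∀ c ∈ w, PySem.Chars.isspace c = false) →
    (∀ c ∈ cur, PySem.Chars.isspace c = false) →
    ∀ w ∈ PySem.Chars.split₀.go s cur acc, w ≠ [] ∧ ∀ c ∈ w, PySem.Chars.isspace c = false := by
  induction s with
  | nil =>
    intro cur acc hacc hcur w hw
    cases cur with
    | nil => simp [PySem.Chars.split₀.go] at hw; exact hacc w (by simpa using hw)
    | cons d e =>
      simp [PySem.Chars.split₀.go] at hw
      rcases hw with hw | hw
      · exact hacc w hw
      · subst hw
        refine ⟨by simp, ?_⟩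
        intro c hc
        have : c = d ∨ c ∈ e := by
          rcases by simpa using hc with h | h
          · exact Or.inr h
          · exact Or.inl h
        exact hcur c (by simpa using this)
  | cons a r ih =>
    intro cur acc hacc hcur w hw
    by_cases ha : PySem.Chars.isspace a = true
    · cases cur with
      | nil =>
        simp only [PySem.Chars.split₀.go, ha, if_true, List.isEmpty_nil] at hw
        exact ih [] acc hacc (by simp) w hw
      | cons d e =>
        simp only [PySem.Chars.split₀.go, ha, if_true, List.isEmpty_cons] at hw
        refine ih [] ((d :: e).reverse :: acc) ?_ (by simp) w hw
        intro v hv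
        rcases List.mem_cons.mp hv with rfl | hv
        · refine ⟨by simp, fun c hc => ?_⟩
          have : c = d ∨ c ∈ e := by
            rcases by simpa using hc with h | h
            · exact Or.inr h
            · exact Or.inl h
          exact hcur c (by simpa using this)
        · exact hacc v hv
    · simp only [PySem.Chars.split₀.go, ha] at hw
      refine ih (a :: cur) acc hacc ?_ w hw
      intro c hc
      rcases List.mem_cons.mp hc with rfl | hc
      · simpa using ha
      · exact hcur c hc

theorem pv_split₀_words (s : List Char) :
    ∀ w ∈ PySem.Chars.split₀ s, w ≠ [] ∧ ∀ c ∈ w, PySem.Chars.isspace c = false := by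
  exact pv_split₀_go_words s [] [] (by simp) (by simp)

theorem pv_split₀_go_nil_iff (s : List Char) : ∀ (cur : List Char) (acc : List (List Char)),
    PySem.Chars.split₀.go s cur acc = [] ↔ (acc = [] ∧ cur = [] ∧ ∀ c ∈ s, PySem.Chars.isspace c = true) := by
  induction s with
  | nil =>
    intro cur acc
    cases cur <;> simp [PySem.Chars.split₀.go]
  | cons a r ih =>
    intro cur acc
    by_cases ha : PySem.Chars.isspace a = true
    · cases cur with
      | nil =>
        simp only [PySem.Chars.split₀.go, ha, if_true, List.isEmpty_nil, ih]
        simp [ha]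
      | cons d e =>
        simp only [PySem.Chars.split₀.go, ha, if_true, List.isEmpty_cons, List.cons_ne_nil,
          Bool.false_eq_true, if_false]
        rw [ih]
        simp
    · simp only [PySem.Chars.split₀.go, ha, Bool.false_eq_true, if_false]
      rw [ih]
      simp [ha]

theorem pv_split₀_eq_nil_iff (s : List Char) :
    PySem.Chars.split₀ s = [] ↔ ∀ c ∈ s, PySem.Chars.isspace c = true := by
  rw [PySem.Chars.split₀, pv_split₀_go_nil_iff]
  simp

-- ---------- string-level reformulation of the two ports ----------
def pvKeep (l : String) : Bool := decide ((PySem.Str.split₀ l).length > 0)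

def pvFinishA (st : List String × String) : List String :=
  if PySem.Str.len st.2 > 0 then st.1 ++ [st.2] else st.1

def pvStepA (st : List String × String) (line : String) : List String × String :=
  let arr := st.1
  let cur := st.2
  match (PySem.List.pyGet? (PySem.Str.split₀ line) 0).bind (fun w => PySem.Str.pyGet? w 0) with
  | none => (arr, cur)
  | some c =>
    if String.ofList [c] ∈ (PySem.List.pyRange 1 10 1).map (fun i => PySem.Int.toStr i) then
      ((if (PySem.Str.split₀ cur).length > 0 then arr ++ [cur] else arr),
       PySem.Str.join " " (PySem.List.slice (PySem.Str.split₀ line) (some 1) none))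
    else
      (arr, if PySem.Str.len cur > 0 then pvCat cur (pvCat "\n" line) else cur)

def pvStepG (gs : List (List String)) (line : String) : List (List String) :=
  match PySem.Str.split₀ line with
  | [] => gs
  | w :: _ =>
    match PySem.Str.pyGet? w 0 with
    | none => gs
    | some c =>
      if PySem.Str.isIn (String.ofList [c]) "123456789" then gs ++ [[line]]
      else if gs.isEmpty then gs
      else gs.dropLast ++ [gs.getLastD [] ++ [line]]

def pvFmt (g : List String) : Option String :=
  if PySem.Str.join " " ((PySem.Str.split₀ (g.headD "")).drop 1) = "" then none
  else some ((g.drop 1).foldl (fun e line => pvCat e (pvCat "\n" line))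
    (PySem.Str.join " " ((PySem.Str.split₀ (g.headD "")).drop 1)))

def pvEntry (g : List String) : String :=
  PySem.Str.join " " ((PySem.Str.split₀ (g.headD "")).drop 1)

def pvCurOf (gs : List (List String)) : String :=
  match gs.getLast? with
  | none => ""
  | some g => (pvFmt g).getD ""

def pvWF (g : List String) : Prop := g ≠ [] ∧ ∀ l ∈ g, PySem.Str.split₀ l ≠ []

theorem pv_portA_eq (text : String) : make_guardrails_list text =
    if (PySem.Str.split₀ text).length = 0 then []
    else pvFinishA (((PySem.Str.split? (eliminate_empty_lines text) "\n").getD []).foldl pvStepA ([], "")) := rfl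

theorem pv_portB_eq (text : String) : make_guardrails_list_alt text =
    ((((PySem.Str.split? text "\n").getD []).filter
        (fun line => !(PySem.Str.split₀ line).isEmpty)).foldl pvStepG []).filterMap pvFmt := rfl

-- ---------- basic string facts ----------
theorem pv_str_ne_iff (s : String) : s ≠ "" ↔ s.toList ≠ [] := by
  constructor
  · intro h hc
    apply h
    rw [← String.ofList_toList (s := s), hc]
  · intro h hc; exact h (by simp [hc])

theorem pv_len_pos_iff (s : String) : PySem.Str.len s > 0 ↔ s ≠ "" := by
  rw [pv_str_ne_iff]
  unfold PySem.Str.len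
  cases s.toList <;> simp

theorem pvCat_toList (a b : String) : (pvCat a b).toList = a.toList ++ b.toList := by
  simp [pvCat]

theorem pv_chain_toList (xs : List String) (e : String) :
    ∃ t, ((xs.foldl (fun e line => pvCat e (pvCat "\n" line)) e)).toList = e.toList ++ t := by
  induction xs generalizing e with
  | nil => exact ⟨[], by simp⟩
  | cons x r ih =>
    obtain ⟨t, ht⟩ := ih (pvCat e (pvCat "\n" x))
    exact ⟨('\n' :: x.toList) ++ t, by simp [ht, pvCat_toList]⟩

theorem pvFmt_some (g : List String) (v : String) (h : pvFmt g = some v) :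
    pvEntry g ≠ "" ∧ ∃ t, v.toList = (pvEntry g).toList ++ t := by
  unfold pvFmt at h
  split_ifs at h with he
  obtain ⟨t, ht⟩ := pv_chain_toList (g.drop 1) (PySem.Str.join " " ((PySem.Str.split₀ (g.headD "")).drop 1))
  refine ⟨by unfold pvEntry; exact he, t, ?_⟩
  rw [← Option.some_inj.mp h]
  unfold pvEntry
  exact ht

theorem pvFmt_some_ne (g : List String) (v : String) (h : pvFmt g = some v) : v ≠ "" := by
  obtain ⟨he, t, ht⟩ := pvFmt_some g v h
  rw [pv_str_ne_iff, ht]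
  intro hc
  exact (pv_str_ne_iff _ |>.mp he) (by simpa using (List.append_eq_nil_iff.mp hc).1)

-- split₀ at the String level
theorem pv_str_split₀_eq (s : String) :
    PySem.Str.split₀ s = (PySem.Chars.split₀ s.toList).map String.ofList := rfl

theorem pv_good_split₀ (s : String)
    (hgood : s = "" ∨ ∃ c ∈ s.toList, PySem.Chars.isspace c = false) :
    ((PySem.Str.split₀ s).length > 0 ↔ s ≠ "") := by
  rw [pv_str_split₀_eq]
  rcases hgood with rfl | ⟨c, hc, hcs⟩
  · have h0 : PySem.Chars.split₀ ([] : List Char) = [] := by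
      rw [pv_split₀_eq_nil_iff]; intro c hc; simp at hc
    simp [h0]
  · have hne : PySem.Chars.split₀ s.toList ≠ [] := by
      rw [Ne, pv_split₀_eq_nil_iff]
      intro hall
      rw [hall c hc] at hcs; simp at hcs
    have hs : s ≠ "" := by
      rw [pv_str_ne_iff]; intro h0; rw [h0] at hc; simp at hc
    simp [List.length_pos_iff, hne, hs]

-- a prefix view of intercalate
theorem pv_intercalate_head (sep x : List Char) (t : List (List Char)) :
    ∃ r, List.intercalate sep (x :: t) = x ++ r := by
  cases t with
  | nil => exact ⟨[], by simp [List.intercalate]⟩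
  | cons y tt => exact ⟨sep ++ List.intercalate sep (y :: tt), by rw [pv_intercalate_cons]; simp⟩

theorem pv_good_entry (g : List String) (_hwf : pvWF g) :
    pvEntry g = "" ∨ ∃ c ∈ (pvEntry g).toList, PySem.Chars.isspace c = false := by
  unfold pvEntry
  cases hws : (PySem.Str.split₀ (g.headD "")).drop 1 with
  | nil =>
    left
    simp [PySem.Str.join, PySem.Chars.join, List.intercalate]
  | cons w t =>
    right
    have hw : w ∈ PySem.Str.split₀ (g.headD "") := List.mem_of_mem_drop (by rw [hws]; simp)
    rw [pv_str_split₀_eq] at hw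
    obtain ⟨wc, hwc, rfl⟩ := List.mem_map.mp hw
    obtain ⟨hne, hnsp⟩ := pv_split₀_words _ wc hwc
    obtain ⟨r, hr⟩ := pv_intercalate_head " ".toList (String.ofList wc).toList (t.map String.toList)
    cases wc with
    | nil => exact absurd rfl hne
    | cons c0 cr =>
      refine ⟨c0, ?_, hnsp c0 (by simp)⟩
      rw [PySem.Str.toList_join]
      simp only [List.map_cons]
      rw [PySem.Chars.join, hr]
      simp

theorem pv_good_fmt (g : List String) (hwf : pvWF g) :
    (pvFmt g).getD "" = "" ∨ ∃ c ∈ ((pvFmt g).getD "").toList, PySem.Chars.isspace c = false := by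
  cases hf : pvFmt g with
  | none => exact Or.inl rfl
  | some v =>
    obtain ⟨he, t, ht⟩ := pvFmt_some g v hf
    rcases pv_good_entry g hwf with h | ⟨c, hc, hcs⟩
    · exact absurd h he
    · exact Or.inr ⟨c, by simp [ht, hc], hcs⟩

-- ---------- the marker test ----------
def pvMkChars : List Char := ['1','2','3','4','5','6','7','8','9']

theorem pv_numArr_eq :
    (PySem.List.pyRange 1 10 1).map (fun i => PySem.Int.toStr i)
      = ["1","2","3","4","5","6","7","8","9"] := by decide

theorem pv_ofList_singleton_inj (c d : Char) : String.ofList [c] = String.ofList [d] ↔ c = d := by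
  constructor
  · intro h
    have := congrArg String.toList h
    simpa using this
  · rintro rfl; rfl

theorem pv_markerA_iff (c : Char) :
    (String.ofList [c] ∈ (PySem.List.pyRange 1 10 1).map (fun i => PySem.Int.toStr i))
      ↔ c ∈ pvMkChars := by
  rw [pv_numArr_eq]
  have h1 : ("1" : String) = String.ofList ['1'] := rfl
  have h2 : ("2" : String) = String.ofList ['2'] := rfl
  have h3 : ("3" : String) = String.ofList ['3'] := rfl
  have h4 : ("4" : String) = String.ofList ['4'] := rfl
  have h5 : ("5" : String) = String.ofList ['5'] := rfl
  have h6 : ("6" : String) = String.ofList ['6'] := rfl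
  have h7 : ("7" : String) = String.ofList ['7'] := rfl
  have h8 : ("8" : String) = String.ofList ['8'] := rfl
  have h9 : ("9" : String) = String.ofList ['9'] := rfl
  simp only [List.mem_cons, List.not_mem_nil, or_false, h1, h2, h3, h4, h5, h6, h7, h8, h9,
    pv_ofList_singleton_inj, pvMkChars]

theorem pv_infix_singleton (c : Char) (l : List Char) : [c] <:+: l ↔ c ∈ l := by
  constructor
  · intro h; exact h.subset (by simp)
  · intro h
    obtain ⟨s, t, hst⟩ := List.append_of_mem h
    exact ⟨s, t, by simp [hst]⟩

theorem pv_markerB_iff (c : Char) :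
    PySem.Str.isIn (String.ofList [c]) "123456789" = true ↔ c ∈ pvMkChars := by
  unfold PySem.Str.isIn
  rw [PySem.Chars.isIn_iff_infix]
  have : (String.ofList [c]).toList = [c] := by simp
  rw [this]
  have : ("123456789" : String).toList = pvMkChars := rfl
  rw [this, pv_infix_singleton]

-- ---------- the main loop correspondence ----------
theorem pv_good_curOf (gs : List (List String)) (hgs : ∀ g ∈ gs, pvWF g) :
    pvCurOf gs = "" ∨ ∃ c ∈ (pvCurOf gs).toList, PySem.Chars.isspace c = false := by
  rcases List.eq_nil_or_concat gs with rfl | ⟨init, g, rfl⟩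
  · left; rfl
  · simp only [List.concat_eq_append]
    unfold pvCurOf
    rw [List.getLast?_concat]
    exact pv_good_fmt g (hgs g (by simp [List.concat_eq_append]))

theorem pvCurOf_concat (xs : List (List String)) (g : List String) :
    pvCurOf (xs ++ [g]) = (pvFmt g).getD "" := by
  simp [pvCurOf]

theorem pv_flush_core (gs : List (List String)) :
    (if pvCurOf gs = "" then (gs.dropLast).filterMap pvFmt
     else (gs.dropLast).filterMap pvFmt ++ [pvCurOf gs]) = gs.filterMap pvFmt := by
  rcases List.eq_nil_or_concat gs with rfl | ⟨init, g, rfl⟩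
  · simp [pvCurOf]
  · simp only [List.concat_eq_append]
    unfold pvCurOf
    rw [List.getLast?_concat, List.dropLast_concat, List.filterMap_append]
    cases hf : pvFmt g with
    | none => simp [hf]
    | some v =>
      have hv := pvFmt_some_ne g v hf
      simp [hf, hv]

theorem pv_flush_len (gs : List (List String)) :
    pvFinishA ((gs.dropLast).filterMap pvFmt, pvCurOf gs) = gs.filterMap pvFmt := by
  unfold pvFinishA
  rw [← pv_flush_core gs]
  by_cases h : pvCurOf gs = ""
  · rw [if_pos h, if_neg (by rw [pv_len_pos_iff]; simp [h])]
  · rw [if_neg h, if_pos ((pv_len_pos_iff _).mpr h)]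

theorem pv_flushA (gs : List (List String)) (hgs : ∀ g ∈ gs, pvWF g) :
    (if (PySem.Str.split₀ (pvCurOf gs)).length > 0
     then (gs.dropLast).filterMap pvFmt ++ [pvCurOf gs]
     else (gs.dropLast).filterMap pvFmt) = gs.filterMap pvFmt := by
  rw [← pv_flush_core gs]
  by_cases h : pvCurOf gs = ""
  · rw [if_pos h, if_neg (by rw [pv_good_split₀ _ (pv_good_curOf gs hgs)]; simp [h])]
  · rw [if_neg h, if_pos ((pv_good_split₀ _ (pv_good_curOf gs hgs)).mpr h)]

theorem pv_fmt_getD_singleton (l : String) :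
    (pvFmt [l]).getD "" = PySem.Str.join " " ((PySem.Str.split₀ l).drop 1) := by
  unfold pvFmt
  simp only [List.headD, List.drop, List.foldl_nil]
  split_ifs with h
  · rw [Option.getD_none]; exact h.symm
  · rfl

theorem pv_fmt_concat (g : List String) (l : String) (hg : g ≠ []) :
    pvFmt (g ++ [l]) = (pvFmt g).map (fun v => pvCat v (pvCat "\n" l)) := by
  obtain ⟨a, t, rfl⟩ : ∃ a t, g = a :: t := by
    cases g with
    | nil => exact absurd rfl hg
    | cons a t => exact ⟨a, t, rfl⟩
  unfold pvFmt
  simp only [List.cons_append, List.headD, List.drop, List.foldl_append, List.foldl_cons,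
    List.foldl_nil]
  split_ifs with h
  · simp
  · simp

theorem pv_step_corr (gs : List (List String)) (hgs : ∀ g ∈ gs, pvWF g) (l : String)
    (hl : PySem.Str.split₀ l ≠ []) :
    pvStepA ((gs.dropLast).filterMap pvFmt, pvCurOf gs) l
        = (((pvStepG gs l).dropLast).filterMap pvFmt, pvCurOf (pvStepG gs l))
    ∧ (∀ g ∈ pvStepG gs l, pvWF g) := by
  cases hsp : PySem.Str.split₀ l with
  | nil => exact absurd hsp hl
  | cons w ws =>
  have hmap : PySem.Str.split₀ l = (PySem.Chars.split₀ l.toList).map String.ofList := rfl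
  cases hcs : PySem.Chars.split₀ l.toList with
  | nil => rw [hmap, hcs] at hsp; simp at hsp
  | cons cw cws =>
  rw [hmap, hcs] at hsp
  simp only [List.map_cons, List.cons.injEq] at hsp
  obtain ⟨hw, hws⟩ := hsp
  obtain ⟨hcwne, hcwns⟩ := pv_split₀_words l.toList cw (by rw [hcs]; simp)
  obtain ⟨c0, cr, rfl⟩ : ∃ c0 cr, cw = c0 :: cr := by
    cases cw with
    | nil => exact absurd rfl hcwne
    | cons c0 cr => exact ⟨c0, cr, rfl⟩
  have hwl : w.toList = c0 :: cr := by rw [← hw]; simp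
  have hnum : ((PySem.List.pyGet? (PySem.Str.split₀ l) 0).bind (fun w => PySem.Str.pyGet? w 0))
      = some c0 := by
    rw [hmap, hcs]
    simp only [List.map_cons]
    have h1 : PySem.List.pyGet? (String.ofList (c0 :: cr) :: cws.map String.ofList) (0 : Int)
        = some (String.ofList (c0 :: cr)) := by
      simp [PySem.List.pyGet?, PySem.List.pyIdx?]
    rw [h1, Option.bind_some]
    unfold PySem.Str.pyGet? PySem.Chars.pyGet?
    simp [PySem.List.pyGet?, PySem.List.pyIdx?]
  have hstepA : pvStepA ((gs.dropLast).filterMap pvFmt, pvCurOf gs) l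
      = (if String.ofList [c0] ∈ (PySem.List.pyRange 1 10 1).map (fun i => PySem.Int.toStr i) then
          ((if (PySem.Str.split₀ (pvCurOf gs)).length > 0
            then (gs.dropLast).filterMap pvFmt ++ [pvCurOf gs]
            else (gs.dropLast).filterMap pvFmt),
           PySem.Str.join " " (PySem.List.slice (PySem.Str.split₀ l) (some 1) none))
        else
          ((gs.dropLast).filterMap pvFmt,
           if PySem.Str.len (pvCurOf gs) > 0
           then pvCat (pvCurOf gs) (pvCat "\n" l) else pvCurOf gs)) := by
    unfold pvStepA
    rw [hnum]
  have hstepG : pvStepG gs l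
      = (if PySem.Str.isIn (String.ofList [c0]) "123456789" then gs ++ [[l]]
         else if gs.isEmpty then gs
         else gs.dropLast ++ [gs.getLastD [] ++ [l]]) := by
    unfold pvStepG
    rw [hmap, hcs]
    simp only [List.map_cons]
    have h2 : PySem.Str.pyGet? (String.ofList (c0 :: cr)) 0 = some c0 := by
      unfold PySem.Str.pyGet? PySem.Chars.pyGet?
      simp [PySem.List.pyGet?, PySem.List.pyIdx?]
    rw [h2]
  by_cases hmk : c0 ∈ pvMkChars
  · -- marker line: close the running entry, open a new group
    rw [hstepA, hstepG, if_pos ((pv_markerA_iff c0).mpr hmk),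
        if_pos ((pv_markerB_iff c0).mpr hmk)]
    constructor
    · rw [pv_flushA gs hgs]
      rw [List.dropLast_concat, pvCurOf_concat, pv_fmt_getD_singleton l]
      have hsl : PySem.List.slice (PySem.Str.split₀ l) (some 1) none
          = (PySem.Str.split₀ l).drop 1 := by
        rw [PySem.List.slice_from _ (by norm_num)]
        simp
      rw [hsl]
    · intro g hg
      rcases List.mem_append.mp hg with hg | hg
      · exact hgs g hg
      · simp only [List.mem_singleton] at hg
        subst hg
        exact ⟨by simp, fun l2 hl2 => by simp only [List.mem_singleton] at hl2; subst hl2; exact hl⟩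
  · -- continuation line
    have hBneg : ¬ (PySem.Str.isIn (String.ofList [c0]) "123456789" = true) :=
      fun h => hmk ((pv_markerB_iff c0).mp h)
    rw [hstepA, hstepG, if_neg (fun h => hmk ((pv_markerA_iff c0).mp h)), if_neg hBneg]
    rcases List.eq_nil_or_concat gs with rfl | ⟨init, g, rfl⟩
    · simp only [List.isEmpty_nil, if_true]
      refine ⟨?_, hgs⟩
      have hcur : pvCurOf ([] : List (List String)) = "" := rfl
      rw [hcur, if_neg (by rw [pv_len_pos_iff]; simp)]
    · simp only [List.concat_eq_append]
      have hne : (init ++ [g]).isEmpty = false := by simp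
      simp only [hne, Bool.false_eq_true, if_false]
      rw [List.getLastD_concat, List.dropLast_concat]
      constructor
      · rw [List.dropLast_concat, pvCurOf_concat, pvCurOf_concat,
            pv_fmt_concat g l (hgs g (by simp)).1]
        cases hf : pvFmt g with
        | none =>
          simp only [Option.map_none, Option.getD_none]
          rw [if_neg (by rw [pv_len_pos_iff]; simp)]
        | some v =>
          simp only [Option.map_some, Option.getD_some]
          rw [if_pos ((pv_len_pos_iff _).mpr (pvFmt_some_ne g v hf))]
      · intro g2 hg2
        rcases List.mem_append.mp hg2 with hg2 | hg2
        · exact hgs g2 (by simp [hg2])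
        · simp only [List.mem_singleton] at hg2
          subst hg2
          obtain ⟨hgne, hglines⟩ := hgs g (by simp)
          refine ⟨by simp, fun l2 hl2 => ?_⟩
          rcases List.mem_append.mp hl2 with h | h
          · exact hglines l2 h
          · simp only [List.mem_singleton] at h; subst h; exact hl

theorem pv_main_ind (L : List String) (hL : ∀ l ∈ L, PySem.Str.split₀ l ≠ [])
    (gs : List (List String)) (hgs : ∀ g ∈ gs, pvWF g) :
    pvFinishA (L.foldl pvStepA ((gs.dropLast).filterMap pvFmt, pvCurOf gs))
      = (L.foldl pvStepG gs).filterMap pvFmt := by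
  induction L generalizing gs with
  | nil => exact pv_flush_len gs
  | cons l rest ih =>
    obtain ⟨hstate, hwf⟩ := pv_step_corr gs hgs l (hL l (by simp))
    simp only [List.foldl_cons]
    rw [hstate]
    exact ih (fun l2 hl2 => hL l2 (by simp [hl2])) (pvStepG gs l) hwf

-- ---------- assembling the top level ----------
theorem pv_lines0_eq (text : String) :
    (PySem.Str.split? text "\n").getD [] = (pvMySplit text.toList).map String.ofList := by
  unfold PySem.Str.split? PySem.Chars.split?
  have h : ("\n" : String).toList = ['\n'] := rfl
  rw [h]
  simp only [List.isEmpty_cons, Bool.false_eq_true, if_false]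
  rw [pv_splitOn_nl]
  rfl

theorem pv_foldl_filter (ls : List String) (acc : List String) :
    ls.foldl (fun acc line => if (PySem.Str.split₀ line).length > 0 then acc ++ [line] else acc) acc
      = acc ++ ls.filter pvKeep := by
  induction ls generalizing acc with
  | nil => simp
  | cons x r ih =>
    by_cases h : (PySem.Str.split₀ x).length > 0
    · rw [List.foldl_cons, if_pos h, ih, List.filter_cons, if_pos (by simp [pvKeep, h])]
      simp
    · rw [List.foldl_cons, if_neg h, ih, List.filter_cons, if_neg (by simp [pvKeep, h])]

theorem pv_filter_eq (ls : List String) :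
    ls.filter (fun line => !(PySem.Str.split₀ line).isEmpty) = ls.filter pvKeep := by
  apply List.filter_congr
  intro x _
  cases hx : PySem.Str.split₀ x <;> simp [pvKeep, hx]

theorem pv_elim_eq (text : String) : eliminate_empty_lines text =
    PySem.Str.join "\n" (((PySem.Str.split? text "\n").getD []).foldl
      (fun acc line => if (PySem.Str.split₀ line).length > 0 then acc ++ [line] else acc) []) := rfl

theorem pv_split_join (kps : List (List Char)) (h1 : ∀ p ∈ kps, '\n' ∉ p) (h2 : kps ≠ []) :
    (PySem.Str.split? (PySem.Str.join "\n" (kps.map String.ofList)) "\n").getD []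
      = kps.map String.ofList := by
  rw [pv_lines0_eq, PySem.Str.toList_join]
  have h : ("\n" : String).toList = ['\n'] := rfl
  rw [h]
  have hmt : (kps.map String.ofList).map String.toList = kps := by
    rw [List.map_map]
    have : (String.toList ∘ String.ofList) = (id : List Char → List Char) := by
      funext x; simp
    rw [this, List.map_id]
  rw [hmt, pvMySplit_join kps h1 h2]

theorem pv_mem_intercalate_of (ps : List (List Char)) (p : List Char) (hp : p ∈ ps)
    (c : Char) (hc : c ∈ p) : c ∈ List.intercalate ['\n'] ps := by
  induction ps with
  | nil => simp at hp
  | cons x t ih =>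
    cases t with
    | nil =>
      simp only [List.mem_singleton] at hp
      subst hp
      simpa [List.intercalate] using hc
    | cons y tt =>
      rw [pv_intercalate_cons]
      rcases List.mem_cons.mp hp with rfl | hp
      · simp [hc]
      · simp [ih hp]

theorem pv_intercalate_mem (ps : List (List Char)) (c : Char)
    (hc : c ∈ List.intercalate ['\n'] ps) : (∃ p ∈ ps, c ∈ p) ∨ c = '\n' := by
  induction ps with
  | nil => simp [List.intercalate] at hc
  | cons x t ih =>
    cases t with
    | nil =>
      simp only [List.intercalate, List.intersperse, List.flatten] at hc
      exact Or.inl ⟨x, by simp, by simpa using hc⟩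
    | cons y tt =>
      rw [pv_intercalate_cons] at hc
      rcases List.mem_append.mp hc with h | h
      · rcases List.mem_append.mp h with h | h
        · exact Or.inl ⟨x, by simp, h⟩
        · simp only [List.mem_singleton] at h
          exact Or.inr h
      · rcases ih h with ⟨p, hp, hcp⟩ | h
        · exact Or.inl ⟨p, by simp [hp], hcp⟩
        · exact Or.inr h

theorem pv_guard_iff (text : String) :
    ((PySem.Str.split₀ text).length = 0)
      ↔ (pvMySplit text.toList).filter (pvKeep ∘ String.ofList) = [] := by
  rw [pv_str_split₀_eq, List.length_map, List.length_eq_zero_iff, pv_split₀_eq_nil_iff,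
      List.filter_eq_nil_iff]
  constructor
  · intro hall p hp
    simp only [Function.comp, pvKeep, decide_eq_true_eq, not_lt, Nat.le_zero]
    rw [Nat.le_zero.symm]
    have : PySem.Chars.split₀ p = [] := by
      rw [pv_split₀_eq_nil_iff]
      intro c hc
      exact hall c (by
        rw [← pv_join_mySplit text.toList, PySem.Chars.join]
        exact pv_mem_intercalate_of _ p hp c hc)
    rw [pv_str_split₀_eq]
    simp [this]
  · intro hk c hc
    rw [← pv_join_mySplit text.toList, PySem.Chars.join] at hc
    rcases pv_intercalate_mem _ c hc with ⟨p, hp, hcp⟩ | rfl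
    · have := hk p hp
      simp only [Function.comp, pvKeep, decide_eq_true_eq, not_lt, Nat.le_zero,
        List.length_eq_zero_iff, pv_str_split₀_eq] at this
      have hnil : PySem.Chars.split₀ (String.ofList p).toList = [] := by
        cases h2 : PySem.Chars.split₀ (String.ofList p).toList with
        | nil => rfl
        | cons a b => rw [h2] at this; simp at this
      rw [String.toList_ofList, pv_split₀_eq_nil_iff] at hnil
      exact hnil c hcp
    · decide

-- ===== VERDICT (by name: the statement is the Claim_ definition above) =====
theorem pv_kps_lines (text : String) :
    ∀ l ∈ ((pvMySplit text.toList).filter (pvKeep ∘ String.ofList)).map String.ofList,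
      PySem.Str.split₀ l ≠ [] := by
  intro l hl
  obtain ⟨p, hp, rfl⟩ := List.mem_map.mp hl
  have := (List.mem_filter.mp hp).2
  simp only [Function.comp, pvKeep, decide_eq_true_eq] at this
  intro hnil
  rw [hnil] at this
  simp at this

theorem make_guardrails_list_spec : Claim_equal_make_guardrails_list := by
  intro text _
  unfold Spec_make_guardrails_list
  rw [pv_portA_eq, pv_portB_eq, pv_elim_eq, pv_lines0_eq text, pv_filter_eq, List.filter_map, pv_foldl_filter, List.nil_append, List.filter_map]
  by_cases hg : (PySem.Str.split₀ text).length = 0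
  · rw [if_pos hg, (pv_guard_iff text).mp hg]
    simp
  · rw [if_neg hg]
    have hkne : (pvMySplit text.toList).filter (pvKeep ∘ String.ofList) ≠ [] :=
      fun h => hg ((pv_guard_iff text).mpr h)
    have hnl : ∀ p ∈ (pvMySplit text.toList).filter (pvKeep ∘ String.ofList), '\n' ∉ p :=
      fun p hp => pvMySplit_no_nl text.toList p (List.mem_of_mem_filter hp)
    rw [pv_split_join _ hnl hkne]
    have hmain := pv_main_ind
      (((pvMySplit text.toList).filter (pvKeep ∘ String.ofList)).map String.ofList)
      (pv_kps_lines text) [] (by simp)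
    simpa [pvCurOf] using hmain
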